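-- pv_equiv track=rewrite | github.com/sugarcypher/arttra | gallery-source/build_from_folder 2.py | _infer_style
-- ===== SOURCE A (Python) =====
-- STYLE_KEYWORDS = {
--     "Abstract": ["abstract", "expressionism", "gestural"],
--     "Geometric": ["geometric", "geometry", "shapes", "pattern"],
--     "Floral": ["floral", "botanical", "flower", "bloom", "plant"],
--     "Minimal": ["minimal", "minimalist", "simple", "clean"],
--     "Landscape": ["landscape", "scenery", "mountain", "ocean", "sky"],
--     "Digital": ["digital", "generative", "glitch", "nft"],
--     "Mixed Media": ["mixed", "collage", "assemblage"],
--     "Photography": ["photo", "film", "street"],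
--     "Metal Art": ["metal", "steel", "iron", "laser", "cut"],
-- }
--
-- def _infer_style(filename: str) -> str:
--     text = filename.lower().replace("-", " ").replace("_", " ")
--     scores = {}
--     for style, keywords in STYLE_KEYWORDS.items():
--         score = sum(1 for kw in keywords if kw in text)
--         if score > 0:
--             scores[style] = score
--     return max(scores, key=scores.get) if scores else "Metal Art"
-- ===== SOURCE B (Python) =====
-- STYLE_KEYWORDS = {
--     "Abstract": ["abstract", "expressionism", "gestural"],
--     "Geometric": ["geometric", "geometry", "shapes", "pattern"],
--     "Floral": ["floral", "botanical", "flower", "bloom", "plant"],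
--     "Minimal": ["minimal", "minimalist", "simple", "clean"],
--     "Landscape": ["landscape", "scenery", "mountain", "ocean", "sky"],
--     "Digital": ["digital", "generative", "glitch", "nft"],
--     "Mixed Media": ["mixed", "collage", "assemblage"],
--     "Photography": ["photo", "film", "street"],
--     "Metal Art": ["metal", "steel", "iron", "laser", "cut"],
-- }
--
--
-- def _infer_style(filename: str) -> str:
--     # Sort-then-pick: stable-sort the whole style table by descending hit count
--     # and take the head.  Stability makes the head the FIRST style attaining the
--     # maximal count (= max()'s first-wins tie rule); if even the head has no hit
--     # every count is zero, so fall back to "Metal Art".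
--     text = filename.lower().replace("-", " ").replace("_", " ")
--     ranked = sorted(STYLE_KEYWORDS.items(),
--                     key=lambda item: -sum(kw in text for kw in item[1]))
--     style, keywords = ranked[0]
--     if any(kw in text for kw in keywords):
--         return style
--     return "Metal Art"
-- ===== Notes on version B (the rewrite author's own statement) =====
-- stated objective: alternative
-- what changed: Replaces A's build-a-dict-of-positive-scores-then-max(key=get) scheme with sort-then-pick: stable-sort the whole style table by descending hit count, take the head (stability gives max()'s first-wins tie rule), and fall back to 'Metal Art' when the head has no hit.
import Mathlib
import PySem

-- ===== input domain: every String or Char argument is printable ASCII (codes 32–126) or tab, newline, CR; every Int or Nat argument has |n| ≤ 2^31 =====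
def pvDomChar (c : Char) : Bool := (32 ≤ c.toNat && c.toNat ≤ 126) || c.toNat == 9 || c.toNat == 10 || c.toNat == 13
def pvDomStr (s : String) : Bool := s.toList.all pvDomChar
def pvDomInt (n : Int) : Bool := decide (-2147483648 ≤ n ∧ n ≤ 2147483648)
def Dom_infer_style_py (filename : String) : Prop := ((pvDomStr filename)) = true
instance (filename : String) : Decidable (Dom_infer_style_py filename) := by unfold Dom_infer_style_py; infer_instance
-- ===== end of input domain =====

-- B replaces A's dict-of-positive-scores-then-max scheme by sort-then-pick: stable-sort the
-- style table by descending hit count and take the head (alternative decomposition, same cost).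

-- ===== PORT A =====
def styleKeywords : List (String × List String) := [
  ("Abstract", ["abstract", "expressionism", "gestural"]),
  ("Geometric", ["geometric", "geometry", "shapes", "pattern"]),
  ("Floral", ["floral", "botanical", "flower", "bloom", "plant"]),
  ("Minimal", ["minimal", "minimalist", "simple", "clean"]),
  ("Landscape", ["landscape", "scenery", "mountain", "ocean", "sky"]),
  ("Digital", ["digital", "generative", "glitch", "nft"]),
  ("Mixed Media", ["mixed", "collage", "assemblage"]),
  ("Photography", ["photo", "film", "street"]),
  ("Metal Art", ["metal", "steel", "iron", "laser", "cut"])]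

def infer_style_py (filename : String) : String :=
  let text := PySem.Str.replace (PySem.Str.replace (PySem.Str.lower filename) "-" " ") "_" " "
  let scores : PySem.Dict String Int :=
    styleKeywords.foldl (fun d p =>
      let score := p.2.foldl (fun acc kw => if PySem.Str.isIn kw text then acc + 1 else acc) (0 : Int)
      if 0 < score then d.insert p.1 score else d) PySem.Dict.empty
  match PySem.List.max? scores.keys (fun k => scores.getD k 0) with
  | some s => s
  | none => "Metal Art"

-- ===== PORT B =====
def infer_style_py_alt (filename : String) : String :=
  let text := PySem.Str.replace (PySem.Str.replace (PySem.Str.lower filename) "-" " ") "_" " "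
  let ranked := PySem.List.sorted styleKeywords
    (fun item => -(item.2.foldl (fun acc kw => if PySem.Str.isIn kw text then acc + 1 else acc) (0 : Int)))
  match ranked with
  | (style, keywords) :: _ =>
      if keywords.any (fun kw => PySem.Str.isIn kw text) then style else "Metal Art"
  | [] => "Metal Art"

-- ===== PRECONDITION & SPEC =====
def Spec_infer_style_py (filename : String) (out : String) : Prop := out = infer_style_py_alt filename
instance (filename : String) (out : String) : Decidable (Spec_infer_style_py filename out) := by unfold Spec_infer_style_py; infer_instance

-- ===== CLAIM (what is proved, stated in full; the proofs are below) =====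
def Claim_equal_infer_style_py : Prop := ∀ (filename : String), Dom_infer_style_py filename → Spec_infer_style_py filename (infer_style_py filename)

-- ===== LEMMAS AND PROOFS =====

-- hit count of one style against the lowered text
def fscore (text : String) (p : String × List String) : Int :=
  (p.2.countP (fun kw => PySem.Str.isIn kw text) : Int)

-- the step of Python's max(..., key=...) over styles scored by fscore
def maxstep (text : String) (a : Option (String × List String)) (p : String × List String) :
    Option (String × List String) :=
  match a with
  | none => some p
  | some m => if fscore text m < fscore text p then some p else some m

lemma fscore_nonneg (text : String) (p : String × List String) : 0 ≤ fscore text p :=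
  Int.natCast_nonneg _

-- A's scores dict, as an items list: the positively-scoring styles in order.
lemma scores_items (text : String) :
    ∀ (L : List (String × List String)) (d : PySem.Dict String Int),
    (L.map Prod.fst ++ d.keys).Nodup →
    (L.foldl (fun d p => if 0 < fscore text p then d.insert p.1 (fscore text p) else d) d).items
      = d.items ++ (L.filter (fun p => decide (0 < fscore text p))).map (fun p => (p.1, fscore text p)) := by
  intro L
  induction L with
  | nil => intro d _; simp
  | cons p t ih =>
    intro d h
    simp only [List.map_cons, List.cons_append, List.nodup_cons] at h
    obtain ⟨hnot, hrest⟩ := h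
    simp only [List.foldl_cons, List.filter_cons]
    by_cases hp : 0 < fscore text p
    · have hcon : d.contains p.1 = false := by
        apply Bool.eq_false_iff.2
        intro hc
        exact hnot (List.mem_append_right _ ((PySem.Dict.contains_iff_mem_keys d p.1).1 hc))
      rw [if_pos hp]
      rw [ih (d.insert p.1 (fscore text p)) ?_]
      · rw [PySem.Dict.items_insert_of_not_contains d _ hcon]
        simp [hp, List.append_assoc]
      · rw [PySem.Dict.keys_insert_of_not_contains d _ hcon]
        have hperm : (p.1 :: (t.map Prod.fst ++ d.keys)).Perm
            (t.map Prod.fst ++ (d.keys ++ [p.1])) := by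
          rw [← List.append_assoc]
          exact (List.perm_append_singleton _ _).symm
        exact hperm.nodup (List.nodup_cons.2 ⟨hnot, hrest⟩)
    · rw [if_neg hp]
      rw [ih d hrest]
      simp [hp]

-- max? commutes with map (accumulator-generalised form)
lemma max?_map_aux {α β κ : Type} [LT κ] [DecidableLT κ] (g : α → β) (key : β → κ) (xs : List α) :
    ∀ (acc : Option α),
    List.foldl (fun a x => match a with
        | none => some (g x)
        | some m => if key m < key (g x) then some (g x) else some m) (acc.map g) xs
      = (List.foldl (fun a x => match a with
        | none => some x
        | some m => if key (g m) < key (g x) then some x else some m) acc xs).map g := by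
  induction xs with
  | nil => intro acc; rfl
  | cons x t ih =>
    intro acc
    cases acc with
    | none =>
      simpa using ih (some x)
    | some m =>
      simp only [List.foldl_cons, Option.map_some]
      by_cases hc : key (g m) < key (g x)
      · rw [if_pos hc]
        try rw [if_pos hc]
        simpa using ih (some x)
      · rw [if_neg hc]
        try rw [if_neg hc]
        simpa using ih (some m)

lemma max?_map {α β κ : Type} [LT κ] [DecidableLT κ] (g : α → β) (key : β → κ) (xs : List α) :
    PySem.List.max? (xs.map g) key = (PySem.List.max? xs (fun x => key (g x))).map g := by
  unfold PySem.List.max?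
  rw [List.foldl_map]
  simpa using max?_map_aux g key xs none

-- max? only looks at the key on members (accumulator-generalised form)
lemma max?_congr_aux {α κ : Type} [LT κ] [DecidableLT κ] (k1 k2 : α → κ) (xs : List α) :
    ∀ (acc : Option α), (∀ x ∈ xs, k1 x = k2 x) → (∀ m, acc = some m → k1 m = k2 m) →
    List.foldl (fun a x => match a with
        | none => some x
        | some m => if k1 m < k1 x then some x else some m) acc xs
      = List.foldl (fun a x => match a with
        | none => some x
        | some m => if k2 m < k2 x then some x else some m) acc xs := by
  induction xs with
  | nil => intro acc _ _; rfl
  | cons x t ih =>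
    intro acc hmem hacc
    have hx : k1 x = k2 x := hmem x (List.mem_cons_self ..)
    have hmem' : ∀ y ∈ t, k1 y = k2 y := fun y hy => hmem y (List.mem_cons_of_mem _ hy)
    cases acc with
    | none =>
      simp only [List.foldl_cons]
      exact ih (some x) hmem' (by intro m hm; obtain rfl := Option.some.inj hm; exact hx)
    | some m =>
      have hm : k1 m = k2 m := hacc m rfl
      simp only [List.foldl_cons, hm, hx]
      by_cases hc : k2 m < k2 x
      · rw [if_pos hc]
        try rw [if_pos hc]
        exact ih (some x) hmem' (by intro m' hm'; obtain rfl := Option.some.inj hm'; exact hx)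
      · rw [if_neg hc]
        try rw [if_neg hc]
        exact ih (some m) hmem' (by intro m' hm'; obtain rfl := Option.some.inj hm'; exact hm)

lemma max?_congr {α κ : Type} [LT κ] [DecidableLT κ] (xs : List α) (k1 k2 : α → κ)
    (h : ∀ x ∈ xs, k1 x = k2 x) : PySem.List.max? xs k1 = PySem.List.max? xs k2 := by
  unfold PySem.List.max?
  exact max?_congr_aux k1 k2 xs none h (by simp)

-- the max?-fold over the positive entries, related to the max?-fold over the whole list
lemma filtmax (text : String) :
    ∀ (L : List (String × List String)) (acc acc' : Option (String × List String)),
    ((acc' = acc ∧ (∀ m, acc = some m → 0 < fscore text m)) ∨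
     (acc' = none ∧ (∀ m, acc = some m → fscore text m = 0))) →
    (((L.filter (fun p => decide (0 < fscore text p))).foldl (maxstep text) acc'
        = L.foldl (maxstep text) acc ∧
      (∀ m, L.foldl (maxstep text) acc = some m → 0 < fscore text m)) ∨
     ((L.filter (fun p => decide (0 < fscore text p))).foldl (maxstep text) acc' = none ∧
      (∀ m, L.foldl (maxstep text) acc = some m → fscore text m = 0))) := by
  intro L
  induction L with
  | nil =>
    intro acc acc' h
    rcases h with ⟨h1, h2⟩ | ⟨h1, h2⟩
    · exact Or.inl ⟨by simp [h1], h2⟩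
    · exact Or.inr ⟨by simp [h1], h2⟩
  | cons x t ih =>
    intro acc acc' h
    simp only [List.filter_cons, List.foldl_cons]
    by_cases hx : 0 < fscore text x
    · rw [if_pos (decide_eq_true hx)]
      simp only [List.foldl_cons]
      rcases h with ⟨h1, h2⟩ | ⟨h1, h2⟩
      · subst h1
        apply ih
        left
        refine ⟨rfl, ?_⟩
        intro m hm
        cases acc' with
        | none =>
          simp only [maxstep] at hm
          obtain rfl := Option.some.inj hm
          exact hx
        | some a =>
          have ha : 0 < fscore text a := h2 a rfl
          simp only [maxstep] at hm
          split at hm <;> (obtain rfl := Option.some.inj hm; first | exact hx | exact ha)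
      · subst h1
        apply ih
        left
        refine ⟨?_, ?_⟩
        · cases acc with
          | none => rfl
          | some a =>
            have ha : fscore text a = 0 := h2 a rfl
            simp only [maxstep]
            rw [if_pos (by omega)]
        · intro m hm
          cases acc with
          | none =>
            simp only [maxstep] at hm
            obtain rfl := Option.some.inj hm
            exact hx
          | some a =>
            have ha : fscore text a = 0 := h2 a rfl
            simp only [maxstep] at hm
            rw [if_pos (by omega)] at hm
            obtain rfl := Option.some.inj hm
            exact hx
    · rw [if_neg (by simpa using hx)]
      have hx0 : fscore text x = 0 := le_antisymm (by omega) (fscore_nonneg text x)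
      rcases h with ⟨h1, h2⟩ | ⟨h1, h2⟩
      · subst h1
        cases acc' with
        | none =>
          apply ih
          right
          refine ⟨rfl, ?_⟩
          intro m hm
          simp only [maxstep] at hm
          obtain rfl := Option.some.inj hm
          exact hx0
        | some a =>
          have ha : 0 < fscore text a := h2 a rfl
          have hkeep : maxstep text (some a) x = some a := by
            simp only [maxstep]
            rw [if_neg (by omega)]
          rw [hkeep]
          apply ih
          left
          exact ⟨rfl, h2⟩
      · subst h1
        cases acc with
        | none =>
          apply ih
          right
          refine ⟨rfl, ?_⟩
          intro m hm
          simp only [maxstep] at hm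
          obtain rfl := Option.some.inj hm
          exact hx0
        | some a =>
          have ha : fscore text a = 0 := h2 a rfl
          have hkeep : maxstep text (some a) x = some a := by
            simp only [maxstep]
            rw [if_neg (by omega)]
          rw [hkeep]
          apply ih
          right
          exact ⟨rfl, h2⟩

-- the whole of A's body, reduced to the first-argmax over the full style list
lemma A_eq (text : String) :
    (match PySem.List.max?
        ((styleKeywords.foldl (fun d p => if 0 < fscore text p then d.insert p.1 (fscore text p) else d)
          (PySem.Dict.empty : PySem.Dict String Int)).keys)
        (fun k => (styleKeywords.foldl (fun d p => if 0 < fscore text p then d.insert p.1 (fscore text p) else d)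
          (PySem.Dict.empty : PySem.Dict String Int)).getD k 0) with
      | some s => s
      | none => "Metal Art")
    = (match styleKeywords.foldl (maxstep text) none with
      | some m => if 0 < fscore text m then m.1 else "Metal Art"
      | none => "Metal Art") := by
  have hnd : ((styleKeywords.map Prod.fst) ++ (PySem.Dict.empty : PySem.Dict String Int).keys).Nodup := by
    decide
  set d := styleKeywords.foldl (fun d p => if 0 < fscore text p then d.insert p.1 (fscore text p) else d)
    (PySem.Dict.empty : PySem.Dict String Int) with hd
  have hitems : d.items =
      (styleKeywords.filter (fun p => decide (0 < fscore text p))).map (fun p => (p.1, fscore text p)) := by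
    rw [hd, scores_items text styleKeywords _ hnd]
    simp [PySem.Dict.empty]
  have hkeysnd : d.keys.Nodup := by
    have hk : d.keys = (styleKeywords.filter (fun p => decide (0 < fscore text p))).map (fun p => p.1) := by
      simp [PySem.Dict.keys, hitems]
    rw [hk]
    have hsub : (List.filter (fun p => decide (0 < fscore text p)) styleKeywords).Sublist styleKeywords :=
      List.filter_sublist
    exact (hsub.map (fun p : String × List String => p.1)).nodup (by decide)
  have hg : ∀ q ∈ d.items, (fun k => d.getD k 0) q.1 = q.2 := by
    intro q hq
    exact PySem.Dict.getD_of_get?_eq_some d 0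
      (PySem.Dict.get?_of_mem_items d (by simpa using hq) hkeysnd)
  have e1 : d.keys = d.items.map Prod.fst := by simp [PySem.Dict.keys]
  have e2 : PySem.List.max? (d.items.map Prod.fst) (fun k => d.getD k 0)
      = (PySem.List.max? d.items (fun q => d.getD q.1 0)).map Prod.fst :=
    max?_map Prod.fst (fun k => d.getD k 0) d.items
  have e3 : PySem.List.max? d.items (fun q => d.getD q.1 0)
      = PySem.List.max? d.items (fun q => q.2) :=
    max?_congr d.items _ (fun q => q.2) hg
  have e4 : PySem.List.max? d.items (fun q => q.2)
      = (PySem.List.max? (styleKeywords.filter (fun p => decide (0 < fscore text p)))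
          (fscore text)).map (fun p => (p.1, fscore text p)) := by
    rw [hitems, max?_map (fun p => (p.1, fscore text p)) (fun q => q.2) _]
  have hstep : PySem.List.max? (styleKeywords.filter (fun p => decide (0 < fscore text p))) (fscore text)
      = (styleKeywords.filter (fun p => decide (0 < fscore text p))).foldl (maxstep text) none := by
    unfold PySem.List.max?
    congr 1
    funext a p
    cases a <;> rfl
  have hrel := filtmax text styleKeywords none none (Or.inl ⟨rfl, by intro m hm; cases hm⟩)
  rw [e1, e2, e3, e4, hstep]
  rcases hrel with ⟨h1, h2⟩ | ⟨h1, h2⟩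
  · rw [h1]
    cases hc : styleKeywords.foldl (maxstep text) none with
    | none => rfl
    | some m =>
      have := h2 m hc
      simp [this]
  · rw [h1]
    cases hc : styleKeywords.foldl (maxstep text) none with
    | none => rfl
    | some m =>
      have := h2 m hc
      simp [this]

-- head of an insertBy insertion: the min?-style step
lemma head?_insertBy {α : Type} (before : α → α → Bool) (x : α) (ys : List α) :
    (PySem.List.insertBy before x ys).head?
      = match ys.head? with
        | none => some x
        | some y => if before x y then some x else some y := by
  cases ys with
  | nil => rfl
  | cons y t =>
    simp only [PySem.List.insertBy, List.head?_cons]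
    split <;> simp_all

-- head of the insertion-sort fold IS the min?-style running fold (stability: strict '<' only)
lemma head?_foldl_insertBy {α κ : Type} [LT κ] [DecidableLT κ] (key : α → κ) :
    ∀ (L : List α) (acc : List α),
    (L.foldl (fun acc x => PySem.List.insertBy (fun a b => decide (key a < key b)) x acc) acc).head?
      = L.foldl (fun a x => match a with
          | none => some x
          | some m => if key x < key m then some x else some m) acc.head? := by
  intro L
  induction L with
  | nil => intro acc; rfl
  | cons x t ih =>
    intro acc
    simp only [List.foldl_cons]
    rw [ih]
    congr 1
    rw [head?_insertBy]
    cases acc with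
    | nil => rfl
    | cons y ys => simp [decide_eq_true_eq]

-- the any-check is "this style scores positively"
lemma any_pos (text : String) (p : String × List String) :
    (p.2.any (fun kw => PySem.Str.isIn kw text)) = decide (0 < fscore text p) := by
  unfold fscore
  rcases h : p.2.any (fun kw => PySem.Str.isIn kw text) with _ | _
  · simp only [List.any_eq_false] at h
    have h0 : p.2.countP (fun kw => PySem.Str.isIn kw text) = 0 :=
      List.countP_eq_zero.2 (fun a ha => h a ha)
    rw [h0]
    decide
  · simp only [List.any_eq_true] at h
    obtain ⟨kw, hkw, hin⟩ := h
    have hn : 0 < p.2.countP (fun kw => PySem.Str.isIn kw text) :=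
      List.countP_pos_iff.2 ⟨kw, hkw, hin⟩
    have h2 : (0 : Int) < (p.2.countP (fun kw => PySem.Str.isIn kw text) : Int) := by
      exact_mod_cast hn
    exact (decide_eq_true h2).symm

-- the whole of B's body, reduced to the same first-argmax
lemma B_eq (text : String) :
    (match PySem.List.sorted styleKeywords (fun p => -(fscore text p)) false with
      | (style, keywords) :: _ =>
          if keywords.any (fun kw => PySem.Str.isIn kw text) then style else "Metal Art"
      | [] => "Metal Art")
    = (match styleKeywords.foldl (maxstep text) none with
      | some m => if 0 < fscore text m then m.1 else "Metal Art"
      | none => "Metal Art") := by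
  have hh : (PySem.List.sorted styleKeywords (fun p => -(fscore text p)) false).head?
      = styleKeywords.foldl (maxstep text) none := by
    rw [PySem.List.sorted_eq_foldl_insertBy]
    rw [head?_foldl_insertBy (fun p => -(fscore text p)) styleKeywords []]
    rw [show (([] : List (String × List String)).head?) = none from rfl]
    congr 1
    funext a x
    cases a with
    | none => rfl
    | some m => simp [maxstep, neg_lt_neg_iff]
  cases hs : PySem.List.sorted styleKeywords (fun p => -(fscore text p)) false with
  | nil =>
    rw [hs] at hh
    simp only [List.head?_nil] at hh
    rw [← hh]
  | cons q t =>
    rw [hs] at hh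
    simp only [List.head?_cons] at hh
    rw [← hh]
    obtain ⟨style, keywords⟩ := q
    simp only
    rw [any_pos text (style, keywords)]
    by_cases h : 0 < fscore text (style, keywords)
    · rw [if_pos (decide_eq_true h), if_pos h]
    · rw [if_neg (by simpa using h), if_neg h]

-- ===== VERDICT (by name: the statement is the Claim_ definition above) =====
set_option maxHeartbeats 3000000 in
theorem infer_style_py_spec : Claim_equal_infer_style_py := by
  intro filename _
  unfold Spec_infer_style_py
  delta infer_style_py infer_style_py_alt
  simp only [PySem.List.foldl_if_add_one, zero_add]
  have hA := A_eq (PySem.Str.replace (PySem.Str.replace (PySem.Str.lower filename) "-" " ") "_" " ")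
  have hB := B_eq (PySem.Str.replace (PySem.Str.replace (PySem.Str.lower filename) "-" " ") "_" " ")
  simp only [fscore] at hA hB
  exact hA.trans hB.symm
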